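-- pv_equiv track=rewrite | github.com/negatic/ArchiPy | scripts/generate_detailed_changelogs.py | group_files_by_component
-- ===== SOURCE A (Python) =====
-- from collections import defaultdict
--
-- def group_files_by_component(files):
--     """Group files by component (e.g., adapters, utils, models)."""
--     components = defaultdict(list)
--
--     for file in files:
--         if 'adapters/' in file:
--             component = 'adapters'
--             subcomponent = file.split('adapters/')[1].split('/')[0] if '/adapters/' in file else 'core'
--             components[f"{component}/{subcomponent}"].append(file)
--         elif 'helpers/' in file:
--             component = 'helpers'
--             if 'decorators/' in file:
--                 components['helpers/decorators'].append(file)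
--             elif 'utils/' in file:
--                 components['helpers/utils'].append(file)
--             elif 'interceptors/' in file:
--                 components['helpers/interceptors'].append(file)
--             elif 'metaclasses/' in file:
--                 components['helpers/metaclasses'].append(file)
--             else:
--                 components['helpers/core'].append(file)
--         elif 'models/' in file:
--             component = 'models'
--             if 'entities/' in file:
--                 components['models/entities'].append(file)
--             elif 'dtos/' in file:
--                 components['models/dtos'].append(file)
--             elif 'errors/' in file:
--                 components['models/errors'].append(file)
--             elif 'types/' in file:
--                 components['models/types'].append(file)
--             else:
--                 components['models/core'].append(file)
--         elif 'configs/' in file: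
--             components['configs'].append(file)
--         elif file.startswith('docs/'):
--             components['documentation'].append(file)
--         elif file.startswith('tests/') or file.startswith('features/'):
--             components['tests'].append(file)
--         else:
--             components['other'].append(file)
--
--     return components
-- ===== SOURCE B (Python) =====
-- from collections import defaultdict
--
-- # A flat, ordered decision LIST of conjunctive rules replaces A's nested if/elif
-- # tree, and the grouping is staged (decorate with labels, dedup keys in first-
-- # occurrence order, then collect each bucket) instead of mutating a dict per file.
-- # None as a label marks the dynamic adapters/<sub> rule.
-- _RULES = [
--     ((['/adapters/'], []), None),
--     ((['adapters/'], []), 'adapters/core'),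
--     ((['helpers/', 'decorators/'], []), 'helpers/decorators'),
--     ((['helpers/', 'utils/'], []), 'helpers/utils'),
--     ((['helpers/', 'interceptors/'], []), 'helpers/interceptors'),
--     ((['helpers/', 'metaclasses/'], []), 'helpers/metaclasses'),
--     ((['helpers/'], []), 'helpers/core'),
--     ((['models/', 'entities/'], []), 'models/entities'),
--     ((['models/', 'dtos/'], []), 'models/dtos'),
--     ((['models/', 'errors/'], []), 'models/errors'),
--     ((['models/', 'types/'], []), 'models/types'),
--     ((['models/'], []), 'models/core'),
--     ((['configs/'], []), 'configs'),
--     (([], ['docs/']), 'documentation'),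
--     (([], ['tests/']), 'tests'),
--     (([], ['features/']), 'tests'),
-- ]
--
--
-- def _label(file):
--     for (subs, prefixes), label in _RULES:
--         if all(t in file for t in subs) and all(file.startswith(p) for p in prefixes):
--             if label is None:
--                 return 'adapters/' + file.split('adapters/')[1].split('/')[0]
--             return label
--     return 'other'
--
--
-- def group_files_by_component(files):
--     """Group files by component (e.g., adapters, utils, models)."""
--     labeled = [(_label(f), f) for f in files]
--     components = defaultdict(list)
--     for key in dict.fromkeys(lab for lab, _ in labeled):
--         components[key] = [f for lab, f in labeled if lab == key]
--     return components
-- ===== Notes on version B (the rewrite author's own statement) =====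
-- stated objective: alternative
-- what changed: Classification becomes a flat ordered decision list of conjunctive (substrings, prefixes) rules instead of A's nested if/elif tree, and grouping is staged (decorate every file with its label, dedup the labels for first-occurrence key order, then collect each bucket by a filter pass) instead of A's single pass mutating a defaultdict per file.
import Mathlib
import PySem

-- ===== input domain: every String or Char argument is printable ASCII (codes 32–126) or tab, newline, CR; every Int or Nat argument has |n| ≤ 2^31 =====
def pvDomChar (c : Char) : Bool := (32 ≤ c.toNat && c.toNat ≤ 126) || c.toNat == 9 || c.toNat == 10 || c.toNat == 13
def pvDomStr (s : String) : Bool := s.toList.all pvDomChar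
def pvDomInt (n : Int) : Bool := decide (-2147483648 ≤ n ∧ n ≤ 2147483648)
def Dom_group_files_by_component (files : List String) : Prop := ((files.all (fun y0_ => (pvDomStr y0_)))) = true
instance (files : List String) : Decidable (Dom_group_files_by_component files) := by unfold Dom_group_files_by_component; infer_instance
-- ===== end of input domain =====

-- B replaces A's nested if/elif tree and per-file dict mutation by a flat ordered decision list of
-- conjunctive rules plus a staged grouping (decorate with labels, dedup keys, collect each bucket);
-- same behaviour, no speed claim.

-- ===== PORT A =====
-- subcomponent = file.split('adapters/')[1].split('/')[0]; both indexings are guarded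
-- ('adapters/' in file guarantees the splits are long enough), so .getD is never used.
def pvAdaptSub (f : String) : String :=
  (PySem.List.pyGet? ((PySem.Str.split?
      ((PySem.List.pyGet? ((PySem.Str.split? f "adapters/").getD []) 1).getD "") "/").getD []) 0).getD ""

-- the body of A's for-loop, one dict update per branch, branches in A's order
def pvStepA (d : PySem.Dict String (List String)) (f : String) : PySem.Dict String (List String) :=
  if PySem.Str.isIn "adapters/" f then
    let sub := if PySem.Str.isIn "/adapters/" f then pvAdaptSub f else "core"
    d.modify ("adapters" ++ "/" ++ sub) [] (· ++ [f])
  else if PySem.Str.isIn "helpers/" f then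
    if PySem.Str.isIn "decorators/" f then d.modify "helpers/decorators" [] (· ++ [f])
    else if PySem.Str.isIn "utils/" f then d.modify "helpers/utils" [] (· ++ [f])
    else if PySem.Str.isIn "interceptors/" f then d.modify "helpers/interceptors" [] (· ++ [f])
    else if PySem.Str.isIn "metaclasses/" f then d.modify "helpers/metaclasses" [] (· ++ [f])
    else d.modify "helpers/core" [] (· ++ [f])
  else if PySem.Str.isIn "models/" f then
    if PySem.Str.isIn "entities/" f then d.modify "models/entities" [] (· ++ [f])
    else if PySem.Str.isIn "dtos/" f then d.modify "models/dtos" [] (· ++ [f])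
    else if PySem.Str.isIn "errors/" f then d.modify "models/errors" [] (· ++ [f])
    else if PySem.Str.isIn "types/" f then d.modify "models/types" [] (· ++ [f])
    else d.modify "models/core" [] (· ++ [f])
  else if PySem.Str.isIn "configs/" f then d.modify "configs" [] (· ++ [f])
  else if PySem.Str.startswith f "docs/" then d.modify "documentation" [] (· ++ [f])
  else if PySem.Str.startswith f "tests/" || PySem.Str.startswith f "features/" then
    d.modify "tests" [] (· ++ [f])
  else d.modify "other" [] (· ++ [f])

def group_files_by_component (files : List String) : List (String × List String) :=
  (files.foldl pvStepA PySem.Dict.empty).items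

-- ===== PORT B =====
-- Source B's _RULES: ordered conjunctive rules ((substrings, prefixes), label); none = dynamic adapters rule
def pvRules : List ((List String × List String) × Option String) :=
  [((["/adapters/"], []), none),
   ((["adapters/"], []), some "adapters/core"),
   ((["helpers/", "decorators/"], []), some "helpers/decorators"),
   ((["helpers/", "utils/"], []), some "helpers/utils"),
   ((["helpers/", "interceptors/"], []), some "helpers/interceptors"),
   ((["helpers/", "metaclasses/"], []), some "helpers/metaclasses"),
   ((["helpers/"], []), some "helpers/core"),
   ((["models/", "entities/"], []), some "models/entities"),
   ((["models/", "dtos/"], []), some "models/dtos"),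
   ((["models/", "errors/"], []), some "models/errors"),
   ((["models/", "types/"], []), some "models/types"),
   ((["models/"], []), some "models/core"),
   ((["configs/"], []), some "configs"),
   (([], ["docs/"]), some "documentation"),
   (([], ["tests/"]), some "tests"),
   (([], ["features/"]), some "tests")]

-- Source B's _label: first rule whose substrings all occur and whose prefixes all match wins
def pvLabel (f : String) : List ((List String × List String) × Option String) → String
  | [] => "other"
  | ((subs, prefs), lab) :: rest =>
      if subs.all (fun t => PySem.Str.isIn t f) && prefs.all (fun p => PySem.Str.startswith f p) then
        match lab with
        | some s => s
        | none => "adapters/" ++ pvAdaptSub f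
      else pvLabel f rest

def group_files_by_component_alt (files : List String) : List (String × List String) :=
  let labeled := files.map (fun f => (pvLabel f pvRules, f))
  let keys := PySem.List.dedup (labeled.map (·.1))
  (keys.foldl (fun d k =>
      d.insert k ((labeled.filter (fun p => p.1 == k)).map (·.2))) PySem.Dict.empty).items

-- ===== PRECONDITION & SPEC =====
def Spec_group_files_by_component (files : List String) (out : List (String × List String)) : Prop := out = group_files_by_component_alt files
instance (files : List String) (out : List (String × List String)) : Decidable (Spec_group_files_by_component files out) := by unfold Spec_group_files_by_component; infer_instance

-- ===== CLAIM (what is proved, stated in full; the proofs are below) =====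
def Claim_equal_group_files_by_component : Prop := ∀ (files : List String), Dom_group_files_by_component files → Spec_group_files_by_component files (group_files_by_component files)

-- ===== LEMMAS AND PROOFS =====
theorem pvLabel_cons (f : String) (subs prefs : List String) (lab : Option String)
    (rest : List ((List String × List String) × Option String)) :
    pvLabel f (((subs, prefs), lab) :: rest) =
      if subs.all (fun t => PySem.Str.isIn t f) && prefs.all (fun p => PySem.Str.startswith f p) then
        match lab with
        | some s => s
        | none => "adapters/" ++ pvAdaptSub f
      else pvLabel f rest := rfl

theorem pvLabel_nil (f : String) : pvLabel f [] = "other" := rfl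

theorem pvL1 (f t : String) (lab : Option String)
    (rest : List ((List String × List String) × Option String)) :
    pvLabel f ((([t], []), lab) :: rest) =
      if PySem.Str.isIn t f then
        (match lab with
         | some s => s
         | none => "adapters/" ++ pvAdaptSub f)
      else pvLabel f rest := by
  simp only [pvLabel_cons, List.all_cons, List.all_nil, Bool.and_true]

theorem pvL2 (f t u : String) (lab : Option String)
    (rest : List ((List String × List String) × Option String)) :
    pvLabel f ((([t, u], []), lab) :: rest) =
      if PySem.Str.isIn t f && PySem.Str.isIn u f then
        (match lab with
         | some s => s
         | none => "adapters/" ++ pvAdaptSub f)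
      else pvLabel f rest := by
  simp only [pvLabel_cons, List.all_cons, List.all_nil, Bool.and_true]

theorem pvLP (f p : String) (lab : Option String)
    (rest : List ((List String × List String) × Option String)) :
    pvLabel f ((([], [p]), lab) :: rest) =
      if PySem.Str.startswith f p then
        (match lab with
         | some s => s
         | none => "adapters/" ++ pvAdaptSub f)
      else pvLabel f rest := by
  simp only [pvLabel_cons, List.all_cons, List.all_nil, Bool.and_true, Bool.true_and]

theorem adapt_imp (f : String) (h : PySem.Str.isIn "/adapters/" f = true) :
    PySem.Str.isIn "adapters/" f = true := by
  rw [PySem.Str.isIn_iff_infix] at *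
  exact List.IsInfix.trans (by decide) h

theorem pvStepA_eq (d : PySem.Dict String (List String)) (f : String) :
    pvStepA d f = d.modify (pvLabel f pvRules) [] (· ++ [f]) := by
  rw [pvRules, pvL1, pvL1, pvL2, pvL2, pvL2, pvL2, pvL1, pvL2, pvL2, pvL2, pvL2, pvL1,
    pvL1, pvLP, pvLP, pvLP, pvLabel_nil]
  unfold pvStepA
  simp only [apply_ite (fun k => PySem.Dict.modify d k [] (fun x => x ++ [f]))]
  cases ha2 : PySem.Str.isIn "/adapters/" f with
  | true =>
    have ha1 := adapt_imp f ha2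
    simp only [ha1, ha2, eq_self_iff_true, if_true, Bool.false_eq_true, eq_self_iff_true, if_true, if_false, reduceIte]
    try rfl
  | false =>
    cases ha1 : PySem.Str.isIn "adapters/" f with
    | true =>
      simp only [ha1, ha2, Bool.false_eq_true, eq_self_iff_true, if_true, if_false, Bool.false_eq_true, eq_self_iff_true, if_true, if_false, reduceIte]
      try rfl
    | false =>
      simp only [ha1, ha2, Bool.false_eq_true, eq_self_iff_true, if_true, if_false, reduceIte]
      cases hh : PySem.Str.isIn "helpers/" f with
      | true =>
        simp only [hh, Bool.true_and, Bool.false_eq_true, eq_self_iff_true, if_true, if_false, reduceIte]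
        try rfl
      | false =>
        simp only [hh, Bool.false_and, Bool.false_eq_true, eq_self_iff_true, if_true, if_false, reduceIte]
        cases hmo : PySem.Str.isIn "models/" f with
        | true =>
          simp only [hmo, Bool.true_and, Bool.false_eq_true, eq_self_iff_true, if_true, if_false, reduceIte]
          try rfl
        | false =>
          simp only [hmo, Bool.false_and, Bool.false_eq_true, eq_self_iff_true, if_true, if_false, reduceIte]
          cases hpt : PySem.Str.startswith f "tests/" <;>
            cases hpf : PySem.Str.startswith f "features/" <;>
              simp only [hpt, hpf, Bool.or_true, Bool.true_or, Bool.or_false, Bool.false_or,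
                Bool.false_eq_true, eq_self_iff_true, if_true, if_false, reduceIte]
-- ===== VERDICT (by name: the statement is the Claim_ definition above) =====
theorem group_files_by_component_spec : Claim_equal_group_files_by_component := by
  intro files _
  unfold Spec_group_files_by_component group_files_by_component group_files_by_component_alt
  have hfun : pvStepA = fun d f => d.modify (pvLabel f pvRules) [] (· ++ [f]) :=
    funext fun d => funext fun f => pvStepA_eq d f
  rw [hfun]
  have hmap : files.foldl (fun d f => d.modify (pvLabel f pvRules) [] (· ++ [f])) PySem.Dict.empty
      = (files.map (fun f => (pvLabel f pvRules, f))).foldl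
          (fun d p => d.modify p.1 [] (· ++ [p.2])) PySem.Dict.empty := by
    rw [List.foldl_map]
  rw [hmap]
  set labeled := files.map (fun f => (pvLabel f pvRules, f)) with hlab
  set d' := labeled.foldl (fun d p => d.modify p.1 [] (· ++ [p.2])) PySem.Dict.empty with hd'
  have hnd : d'.keys.Nodup := by
    exact PySem.Dict.nodup_keys_foldl_modify_key labeled Prod.fst [] (fun _ p => (· ++ [p.2]))
      PySem.Dict.empty (by simp [PySem.Dict.keys_empty])
  have hkeys : d'.keys = PySem.List.dedup (labeled.map (·.1)) := by
    rw [hd', PySem.Dict.keys_foldl_modify_key]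
    simp [PySem.Set.update_nil_left]
  have hitems : d'.items = d'.keys.map (fun k => (k, d'.getD k [])) :=
    PySem.Dict.items_eq_map_keys d' hnd []
  have hgetD : ∀ k, d'.getD k [] = (labeled.filter (fun p => p.1 == k)).map (·.2) := by
    intro k
    rw [hd', PySem.Dict.getD_foldl_modify_append]
    simp
  have hB : ((PySem.List.dedup (labeled.map (·.1))).foldl (fun d k =>
        d.insert k ((labeled.filter (fun p => p.1 == k)).map (·.2))) PySem.Dict.empty).items
      = (PySem.List.dedup (labeled.map (·.1))).map
          (fun k => (k, (labeled.filter (fun p => p.1 == k)).map (·.2))) := by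
    rw [PySem.Dict.items_foldl_insert_fresh (PySem.List.dedup (labeled.map (·.1))) (fun a => a)
      (fun k => (labeled.filter (fun p => p.1 == k)).map (·.2)) PySem.Dict.empty
      (fun a _ => PySem.Dict.contains_empty a)
      (by simpa using PySem.List.nodup_dedup (labeled.map (·.1)))]
    simp
    rfl
  rw [hB, hitems, hkeys]
  exact List.map_congr_left (fun k _ => by rw [hgetD k])
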